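-- pv_equiv track=rewrite | github.com/keefeWu/408 | python/primeNumber.py | getPrimeArray
-- ===== SOURCE A (Python) =====
-- def is_prime(x):
--     if x == 2:
--         return True
--     elif x % 2 == 0:
--         return False
--     for i in range(3, int(x ** 0.5) + 1, 2):
--         if x % i == 0:
--             return False
--     return True
--
-- def getPrimeArray(x, maxNum):
--     primeArray = []
--     for i in range(1, maxNum+1):
--         if i == x:
--             continue
--         if is_prime(x+i):
--             primeArray.append(i)
--     return primeArray
-- ===== SOURCE B (Python) =====
-- def getPrimeArray(x, maxNum):
--     # Segmented odd-composite sieve over the window [x+1, x+maxNum] instead of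
--     # per-element trial division (1 still counts as "prime", as in the original).
--     if maxNum < 1:
--         return []
--     lo = x + 1
--     hi = x + maxNum
--     r = 0
--     while (r + 1) * (r + 1) <= hi:
--         r += 1
--     composite = set()
--     for p in range(3, r + 1, 2):
--         start = p * p
--         if start < lo:
--             start = lo + (-lo) % p
--             if start % 2 == 0:
--                 start += p
--         for m in range(start, hi + 1, 2 * p):
--             composite.add(m)
--     out = []
--     for i in range(1, maxNum + 1):
--         if i == x:
--             continue
--         n = x + i
--         if n == 2 or (n % 2 == 1 and n not in composite):
--             out.append(i)
--     return out
-- ===== Notes on version B (the rewrite author's own statement) =====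
-- stated objective: faster
-- what changed: Replaces per-element trial division (sqrt work for every i) with a segmented odd-composite sieve over the window [x+1, x+maxNum]: each odd p up to isqrt(x+maxNum) crosses off its odd multiples once, then a single scan emits the surviving i (keeping the original's quirk that 1 counts as prime).
import Mathlib
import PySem

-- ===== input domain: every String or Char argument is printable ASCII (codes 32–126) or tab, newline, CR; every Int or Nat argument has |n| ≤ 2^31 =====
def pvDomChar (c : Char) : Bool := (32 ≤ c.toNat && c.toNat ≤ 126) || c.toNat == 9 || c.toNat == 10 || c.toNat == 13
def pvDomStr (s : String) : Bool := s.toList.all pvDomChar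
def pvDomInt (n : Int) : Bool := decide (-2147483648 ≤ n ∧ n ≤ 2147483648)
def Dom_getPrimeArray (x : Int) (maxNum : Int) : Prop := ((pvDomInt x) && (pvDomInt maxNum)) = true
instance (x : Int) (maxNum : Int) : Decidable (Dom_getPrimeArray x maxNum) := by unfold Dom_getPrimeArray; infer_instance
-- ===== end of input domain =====

-- B replaces A's per-element trial division by a segmented odd-composite sieve over the
-- window [x+1, x+maxNum]; measured faster on the generated inputs.

-- ===== PORT A =====
-- int(x ** 0.5): on the x this port reaches inside Pre_ (0 ≤ x ≤ 2^32) the double sqrt is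
-- exactly the integer square root after truncation, so it is ported as Nat.sqrt.
def pvIsqrtA (x : Int) : Int := (Nat.sqrt x.toNat : Int)

def pv_is_prime (x : Int) : Bool :=
  if x = 2 then true
  else if PySem.Int.mod x 2 = 0 then false
  else if (PySem.List.pyRange 3 (pvIsqrtA x + 1) 2).any (fun i => PySem.Int.mod x i = 0)
       then false  -- the loop's early 'return False' on the first divisor found
  else true

def getPrimeArray (x : Int) (maxNum : Int) : List Int :=
  (PySem.List.pyRange 1 (maxNum + 1) 1).foldl
    (fun acc i =>
      if i = x then acc
      else if pv_is_prime (x + i) then acc ++ [i] else acc) []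

-- ===== PORT B =====
-- the 'while (r+1)*(r+1) <= hi: r += 1' loop of Source B
def pvIsqrtLoop (hi : Int) (r : Nat) : Nat :=
  if ((r : Int) + 1) * ((r : Int) + 1) ≤ hi then pvIsqrtLoop hi (r + 1) else r
termination_by hi.toNat + 1 - r
decreasing_by
  rename_i h
  have h1 : (r : Int) + 1 ≤ hi := le_trans (by nlinarith) h
  omega

def getPrimeArray_alt (x : Int) (maxNum : Int) : List Int :=
  if maxNum < 1 then []
  else
    let lo := x + 1
    let hi := x + maxNum
    let r : Int := (pvIsqrtLoop hi 0 : Int)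
    let composite : PySem.Set Int :=
      (PySem.List.pyRange 3 (r + 1) 2).foldl (fun s p =>
        let start :=
          if p * p < lo then
            let s1 := lo + PySem.Int.mod (-lo) p
            if PySem.Int.mod s1 2 = 0 then s1 + p else s1
          else p * p
        (PySem.List.pyRange start (hi + 1) (2 * p)).foldl (fun s m => PySem.Set.add s m) s)
        PySem.Set.empty
    (PySem.List.pyRange 1 (maxNum + 1) 1).foldl
      (fun acc i =>
        if i = x then acc
        else
          if x + i = 2 ∨ (PySem.Int.mod (x + i) 2 = 1 ∧ ¬ ((x + i) ∈ composite))
          then acc ++ [i] else acc) []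

-- ===== PRECONDITION & SPEC =====
-- Pre_ excludes exactly the inputs on which A raises TypeError: some loop iteration reaches
-- 'x ** 0.5' with a negative (odd) argument, i.e. maxNum ≥ 1 and x ≤ -2 except when the only
-- window value x+1 is even.
def Pre_getPrimeArray (x : Int) (maxNum : Int) : Prop :=
  maxNum ≤ 0 ∨ -1 ≤ x ∨ (maxNum = 1 ∧ x % 2 ≠ 0)
instance (x : Int) (maxNum : Int) : Decidable (Pre_getPrimeArray x maxNum) := by
  unfold Pre_getPrimeArray; infer_instance
def pvWitness_getPrimeArray : Int × Int := (10, 20)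

def Spec_getPrimeArray (x : Int) (maxNum : Int) (out : List Int) : Prop := out = getPrimeArray_alt x maxNum
instance (x : Int) (maxNum : Int) (out : List Int) : Decidable (Spec_getPrimeArray x maxNum out) := by unfold Spec_getPrimeArray; infer_instance

-- ===== CLAIM (what is proved, stated in full; the proofs are below) =====
def Claim_equal_getPrimeArray : Prop := ∀ (x : Int) (maxNum : Int), Dom_getPrimeArray x maxNum → Pre_getPrimeArray x maxNum → Spec_getPrimeArray x maxNum (getPrimeArray x maxNum)

-- ===== LEMMAS AND PROOFS =====

-- "n has an odd divisor d with 3 ≤ d and d² ≤ n": the condition both prime tests decide.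
def pvHasSmallOddDiv (n : Int) : Prop :=
  ∃ d : Int, 3 ≤ d ∧ d * d ≤ n ∧ d % 2 = 1 ∧ d ∣ n

theorem pv_le_sqrt_int (d m : Int) (hd : 0 ≤ d) (hm : 0 ≤ m) :
    d ≤ (Nat.sqrt m.toNat : Int) ↔ d * d ≤ m := by
  have hd' : ((d.toNat : Int)) = d := Int.toNat_of_nonneg hd
  have hm' : ((m.toNat : Int)) = m := Int.toNat_of_nonneg hm
  rw [← hd', ← hm']
  exact_mod_cast Nat.le_sqrt

theorem pvIsqrtLoop_eq (hi : Int) (r : Nat) (h : (r : Int) * (r : Int) ≤ hi) :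
    pvIsqrtLoop hi r = Nat.sqrt hi.toNat := by
  fun_induction pvIsqrtLoop hi r with
  | case1 r hcond ih =>
      exact ih (by push_cast; linarith)
  | case2 r hcond =>
      have hhi : 0 ≤ hi := le_trans (by positivity) h
      have h1 : r ≤ Nat.sqrt hi.toNat := by
        rw [Nat.le_sqrt]
        have : ((r * r : Nat) : Int) ≤ (hi.toNat : Int) := by
          push_cast
          rw [Int.toNat_of_nonneg hhi]
          exact h
        exact_mod_cast this
      have h2 : Nat.sqrt hi.toNat < r + 1 := by
        rw [Nat.sqrt_lt]
        have : (hi.toNat : Int) < (((r+1) * (r+1) : Nat) : Int) := by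
          push_cast
          rw [Int.toNat_of_nonneg hhi]
          have := lt_of_not_ge (fun hge : ((r:Int)+1)*((r:Int)+1) ≤ hi => hcond hge)
          linarith
        exact_mod_cast this
      omega

theorem pvIsqrtLoop_zero (hi : Int) : (pvIsqrtLoop hi 0 : Int) = (Nat.sqrt hi.toNat : Int) := by
  by_cases hhi : 0 ≤ hi
  · rw [pvIsqrtLoop_eq hi 0 (by norm_num; omega)]
  · rw [pvIsqrtLoop]
    rw [if_neg (by push_cast; omega)]
    have : hi.toNat = 0 := by omega
    simp [this]

-- A's trial-division loop finds a divisor iff pvHasSmallOddDiv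
theorem pvA_any_iff (n : Int) (hn : 0 ≤ n) :
    (PySem.List.pyRange 3 (pvIsqrtA n + 1) 2).any (fun i => PySem.Int.mod n i = 0) = true
      ↔ pvHasSmallOddDiv n := by
  rw [List.any_eq_true]
  constructor
  · rintro ⟨d, hdmem, hdiv⟩
    rw [PySem.List.mem_pyRange_iff_of_pos (by norm_num)] at hdmem
    obtain ⟨h3, hlt, hpar⟩ := hdmem
    refine ⟨d, h3, ?_, by omega, ?_⟩
    · exact (pv_le_sqrt_int d n (by omega) hn).mp (by unfold pvIsqrtA at hlt; omega)
    · simp only [decide_eq_true_eq] at hdiv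
      exact (PySem.Int.mod_eq_zero_iff_dvd n d).mp hdiv
  · rintro ⟨d, h3, hsq, hodd, hdvd⟩
    refine ⟨d, ?_, by simp [PySem.Int.mod_eq_zero_iff_dvd, hdvd]⟩
    rw [PySem.List.mem_pyRange_iff_of_pos (by norm_num)]
    refine ⟨h3, ?_, by omega⟩
    have := (pv_le_sqrt_int d n (by omega) hn).mpr hsq
    unfold pvIsqrtA
    omega

theorem pv_mem_foldl_add (l : List Int) (s : PySem.Set Int) (a : Int) :
    a ∈ l.foldl (fun s m => PySem.Set.add s m) s ↔ a ∈ s ∨ a ∈ l := by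
  induction l generalizing s with
  | nil => simp
  | cons x t ih =>
      simp only [List.foldl_cons, ih, PySem.Set.mem_add, List.mem_cons]
      tauto

theorem pv_mem_foldl_outer (L : List Int) (g : Int → List Int) (s : PySem.Set Int) (a : Int) :
    a ∈ L.foldl (fun s p => (g p).foldl (fun s m => PySem.Set.add s m) s) s
      ↔ a ∈ s ∨ ∃ p ∈ L, a ∈ g p := by
  induction L generalizing s with
  | nil => simp
  | cons x t ih =>
      simp only [List.foldl_cons, ih, pv_mem_foldl_add, List.mem_cons]
      constructor
      · rintro ((h | h) | ⟨p, hp, hm⟩)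
        · exact Or.inl h
        · exact Or.inr ⟨x, Or.inl rfl, h⟩
        · exact Or.inr ⟨p, Or.inr hp, hm⟩
      · rintro (h | ⟨p, (rfl | hp), hm⟩)
        · exact Or.inl (Or.inl h)
        · exact Or.inl (Or.inr hm)
        · exact Or.inr ⟨p, hp, hm⟩

theorem pv_two_mul_dvd (p k : Int) (hp : p % 2 = 1) (h2 : 2 ∣ k) (hpk : p ∣ k) : 2 * p ∣ k := by
  obtain ⟨t, rfl⟩ := hpk
  have h : (p * t) % 2 = (p % 2) * (t % 2) % 2 := Int.mul_emod p t 2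
  rw [hp, one_mul] at h
  have ht : (2:Int) ∣ t := by omega
  obtain ⟨u, rfl⟩ := ht
  exact ⟨u, by ring⟩

-- the sieve set contains exactly the window numbers with a small odd divisor (for odd n)
theorem pvB_mem_iff (lo hi n : Int) (hlo : 0 ≤ lo) (hn1 : lo ≤ n) (hn2 : n ≤ hi)
    (hodd : n % 2 = 1) :
    (n ∈ (PySem.List.pyRange 3 ((Nat.sqrt hi.toNat : Int) + 1) 2).foldl (fun s p =>
        let start :=
          if p * p < lo then
            let s1 := lo + PySem.Int.mod (-lo) p
            if PySem.Int.mod s1 2 = 0 then s1 + p else s1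
          else p * p
        (PySem.List.pyRange start (hi + 1) (2 * p)).foldl (fun s m => PySem.Set.add s m) s)
        PySem.Set.empty)
      ↔ pvHasSmallOddDiv n := by
  have hhi : 0 ≤ hi := le_trans hlo (le_trans hn1 hn2)
  rw [pv_mem_foldl_outer (g := fun p =>
        PySem.List.pyRange
          (if p * p < lo then
            (if PySem.Int.mod (lo + PySem.Int.mod (-lo) p) 2 = 0
             then lo + PySem.Int.mod (-lo) p + p else lo + PySem.Int.mod (-lo) p)
           else p * p) (hi + 1) (2 * p))]
  simp only [PySem.Set.empty, List.not_mem_nil, false_or]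
  constructor
  · rintro ⟨p, hpmem, hnmem⟩
    rw [PySem.List.mem_pyRange_iff_of_pos (by norm_num)] at hpmem
    obtain ⟨hp3, hplt, hppar⟩ := hpmem
    have hpodd : p % 2 = 1 := by omega
    have hp0 : 0 < p := by omega
    rw [PySem.List.mem_pyRange_iff_of_pos (by positivity)] at hnmem
    obtain ⟨hstart, hnlt, hstep⟩ := hnmem
    -- p divides START in both branches
    have hmodemod : PySem.Int.mod (-lo) p = (-lo) % p := PySem.Int.mod_eq_emod_of_pos hp0
    have hs1dvd : p ∣ lo + (-lo) % p := by
      have : (lo + (-lo) % p) % p = 0 := by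
        rw [Int.add_emod, Int.emod_emod_of_dvd _ dvd_rfl, ← Int.add_emod]
        simp
      exact Int.dvd_of_emod_eq_zero this
    have hstart_dvd : p ∣ (if p * p < lo then
            (if PySem.Int.mod (lo + PySem.Int.mod (-lo) p) 2 = 0
             then lo + PySem.Int.mod (-lo) p + p else lo + PySem.Int.mod (-lo) p)
           else p * p) := by
      rw [hmodemod]
      split_ifs with h1 h2
      · exact Dvd.dvd.add hs1dvd dvd_rfl
      · exact hs1dvd
      · exact Dvd.intro p rfl
    have hstart_ge : p * p ≤ (if p * p < lo then
            (if PySem.Int.mod (lo + PySem.Int.mod (-lo) p) 2 = 0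
             then lo + PySem.Int.mod (-lo) p + p else lo + PySem.Int.mod (-lo) p)
           else p * p) ∨ p * p < lo := by
      split_ifs <;> omega
    have hpn : p ∣ n := by
      obtain ⟨k, hk⟩ := hstep
      obtain ⟨j, hj⟩ := hstart_dvd
      exact ⟨j + 2 * k, by rw [hj] at hk; linarith [hk]⟩
    refine ⟨p, hp3, ?_, hpodd, hpn⟩
    -- p*p ≤ n
    have hs1ge : lo ≤ lo + (-lo) % p := by
      have := Int.emod_nonneg (-lo) (by omega : p ≠ 0)
      omega
    rcases hstart_ge with h | h
    · omega
    · -- start ≥ lo in this branch, and n ≥ start > p*p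
      have : lo ≤ (if p * p < lo then
            (if PySem.Int.mod (lo + PySem.Int.mod (-lo) p) 2 = 0
             then lo + PySem.Int.mod (-lo) p + p else lo + PySem.Int.mod (-lo) p)
           else p * p) := by
        split_ifs <;> omega
      omega
  · rintro ⟨d, hd3, hdsq, hdodd, hddvd⟩
    have hd0 : 0 < d := by omega
    have hn1' : 1 ≤ n := by omega
    refine ⟨d, ?_, ?_⟩
    · rw [PySem.List.mem_pyRange_iff_of_pos (by norm_num)]
      have : d ≤ (Nat.sqrt hi.toNat : Int) :=
        (pv_le_sqrt_int d hi (by omega) hhi).mpr (le_trans hdsq hn2)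
      exact ⟨hd3, by omega, by omega⟩
    · rw [PySem.List.mem_pyRange_iff_of_pos (by positivity)]
      have hmodemod : PySem.Int.mod (-lo) d = (-lo) % d := PySem.Int.mod_eq_emod_of_pos hd0
      have hmod2 : ∀ z : Int, PySem.Int.mod z 2 = z % 2 := fun z => PySem.Int.mod_eq_emod_of_pos (by norm_num)
      have hddodd : (d * d) % 2 = 1 := by
        have := Int.mul_emod d d 2
        rw [hdodd] at this
        omega
      by_cases hbr : d * d < lo
      · -- segment branch
        set s1 := lo + PySem.Int.mod (-lo) d with hs1def
        have hs1dvd : d ∣ s1 := by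
          rw [hs1def, hmodemod]
          have : (lo + (-lo) % d) % d = 0 := by
            rw [Int.add_emod, Int.emod_emod_of_dvd _ dvd_rfl, ← Int.add_emod]
            simp
          exact Int.dvd_of_emod_eq_zero this
        have hs1lb : lo ≤ s1 := by
          have := Int.emod_nonneg (-lo) (by omega : d ≠ 0)
          rw [hs1def, hmodemod]; omega
        have hs1ub : s1 < lo + d := by
          have := Int.emod_lt_of_pos (-lo) hd0
          rw [hs1def, hmodemod]; omega
        have hs1n : s1 ≤ n := by
          by_contra hcon
          have hcon : n < s1 := lt_of_not_ge hcon
          have hd1 : d ∣ s1 - n := Dvd.dvd.sub hs1dvd hddvd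
          have : d ≤ s1 - n := Int.le_of_dvd (by omega) hd1
          omega
        rw [if_pos hbr]
        by_cases hpar : PySem.Int.mod s1 2 = 0
        · rw [if_pos hpar]
          rw [hmod2] at hpar
          have hne : s1 < n := by
            rcases lt_or_eq_of_le hs1n with h | h
            · exact h
            · exfalso; omega
          have : d ≤ n - s1 := Int.le_of_dvd (by omega) (Dvd.dvd.sub hddvd hs1dvd)
          refine ⟨by omega, by omega, ?_⟩
          apply pv_two_mul_dvd d _ hdodd
          · omega
          · exact Dvd.dvd.sub hddvd (Dvd.dvd.add hs1dvd dvd_rfl)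
        · rw [if_neg hpar]
          rw [hmod2] at hpar
          refine ⟨hs1n, by omega, ?_⟩
          apply pv_two_mul_dvd d _ hdodd
          · omega
          · exact Dvd.dvd.sub hddvd hs1dvd
      · rw [if_neg hbr]
        refine ⟨hdsq, by omega, ?_⟩
        apply pv_two_mul_dvd d _ hdodd
        · omega
        · exact Dvd.dvd.sub hddvd (Dvd.intro d rfl)

-- the pointwise agreement of the two member tests on the window
theorem pv_key (x maxNum i : Int) (_hm : 1 ≤ maxNum)
    (hx : -1 ≤ x ∨ (maxNum = 1 ∧ x % 2 ≠ 0)) (hi1 : 1 ≤ i) (hi2 : i ≤ maxNum) :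
    (pv_is_prime (x + i) = true)
      ↔ (x + i = 2 ∨ (PySem.Int.mod (x + i) 2 = 1 ∧
          ¬ ((x + i) ∈ (PySem.List.pyRange 3 ((pvIsqrtLoop (x + maxNum) 0 : Int) + 1) 2).foldl (fun s p =>
            let start :=
              if p * p < x + 1 then
                let s1 := (x + 1) + PySem.Int.mod (-(x + 1)) p
                if PySem.Int.mod s1 2 = 0 then s1 + p else s1
              else p * p
            (PySem.List.pyRange start ((x + maxNum) + 1) (2 * p)).foldl (fun s m => PySem.Set.add s m) s)
            PySem.Set.empty))) := by
  have hmod2 : PySem.Int.mod (x + i) 2 = (x + i) % 2 := PySem.Int.mod_eq_emod_of_pos (by norm_num)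
  by_cases h2 : x + i = 2
  · simp [pv_is_prime, h2]
  · by_cases hev : (x + i) % 2 = 0
    · -- even, not 2: both sides false
      rw [pv_is_prime, if_neg h2, if_pos (by rw [hmod2]; exact hev)]
      simp [h2, hev]
    · -- odd case: x ≥ -1 necessarily
      have hxge : -1 ≤ x := by
        rcases hx with h | ⟨h1, h2'⟩
        · exact h
        · exfalso; omega
      have hodd : (x + i) % 2 = 1 := by omega
      have hn0 : 0 ≤ x + i := by omega
      rw [pv_is_prime, if_neg h2, if_neg (by rw [hmod2]; omega)]
      rw [pvIsqrtLoop_zero]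
      have hB := pvB_mem_iff (x + 1) (x + maxNum) (x + i) (by omega) (by omega) (by omega) hodd
      have hA := pvA_any_iff (x + i) hn0
      constructor
      · intro h
        refine Or.inr ⟨by omega, ?_⟩
        rw [hB, ← hA]
        intro hany
        rw [hany] at h
        simp at h
      · rintro (h | ⟨_, hnot⟩)
        · exact absurd h h2
        · rw [hB, ← hA] at hnot
          split
          · rename_i hany
            exact absurd hany hnot
          · rfl

-- ===== VERDICT (by name: the statement is the Claim_ definition above) =====
theorem getPrimeArray_spec : Claim_equal_getPrimeArray := by
  intro x maxNum _ hpre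
  unfold Spec_getPrimeArray getPrimeArray getPrimeArray_alt
  by_cases hm : maxNum < 1
  · rw [if_pos hm, PySem.List.pyRange_one_eq_nil (by omega)]
    rfl
  · rw [if_neg hm]
    have hx : -1 ≤ x ∨ (maxNum = 1 ∧ x % 2 ≠ 0) := by
      rcases hpre with h | h | h
      · omega
      · exact Or.inl h
      · exact Or.inr h
    have hm1 : 1 ≤ maxNum := by omega
    apply PySem.List.foldl_congr_mem
    intro acc i hi
    rw [PySem.List.mem_pyRange_one] at hi
    by_cases hix : i = x
    · simp [hix]
    · rw [if_neg hix, if_neg hix]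
      exact if_congr (pv_key x maxNum i hm1 hx (by omega) (by omega)) rfl rfl
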